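-- pv_equiv track=rewrite | github.com/AutoArchive/scripts | publish.py | extract_title_and_content
-- ===== SOURCE A (Python) =====
-- def extract_title_and_content(markdown_content: str) -> tuple[str, str]:
--     """Extract title and content from markdown file."""
--     lines = markdown_content.split('\n')
--     title = ''
--     content_start = 0
--
--     # Find the first heading
--     for i, line in enumerate(lines):
--         if line.startswith('# '):
--             title = line[2:].strip()
--             content_start = i
--             break
--
--     # If no title found, use the whole content
--     if not title:
--         return '', markdown_content
--
--     # Return title and content (excluding the title)
--     return title, '\n'.join(lines[content_start+1:]).strip()
-- ===== SOURCE B (Python) =====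
-- def extract_title_and_content(markdown_content: str) -> tuple[str, str]:
--     """Extract title and content from markdown file."""
--     rest = markdown_content
--     while True:
--         line, sep, after = rest.partition('\n')
--         if line.startswith('# '):
--             title = line[2:].strip()
--             if title:
--                 return title, after.strip()
--             return '', markdown_content
--         if not sep:
--             return '', markdown_content
--         rest = after
-- ===== Notes on version B (the rewrite author's own statement) =====
-- stated objective: idiomatic
-- what changed: Instead of splitting the whole string into a list of lines and re-joining the tail, B scans with str.partition on the newline separator, peeling one line at a time and returning the untouched remainder of the string directly, so no line list is built and no join is performed.
import Mathlib
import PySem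

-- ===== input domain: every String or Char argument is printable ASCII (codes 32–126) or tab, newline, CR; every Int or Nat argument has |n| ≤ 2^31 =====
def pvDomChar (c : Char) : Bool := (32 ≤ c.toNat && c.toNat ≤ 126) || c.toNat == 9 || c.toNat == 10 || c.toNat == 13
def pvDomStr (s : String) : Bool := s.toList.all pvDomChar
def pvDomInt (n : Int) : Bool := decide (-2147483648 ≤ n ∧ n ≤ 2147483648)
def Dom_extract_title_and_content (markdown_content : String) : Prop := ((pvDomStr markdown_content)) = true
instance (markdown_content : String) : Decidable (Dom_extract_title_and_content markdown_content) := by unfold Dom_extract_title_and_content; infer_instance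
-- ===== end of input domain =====

-- B rewrites A's split-all-lines-then-rejoin pass as a single partition-driven scan over the
-- string (idiomatic str.partition loop); return value only, no side effects in either version.

-- ===== PORT A =====
-- the 'for i, line in enumerate(lines): if line.startswith("# "): …; break' loop:
-- returns the break state some (title, content_start), or none if the loop finishes
def pvALoop : List String → Nat → Option (String × Nat)
  | [], _ => none
  | line :: rest, i =>
    if PySem.Str.startswith line "# " then
      some (PySem.Str.strip (PySem.Str.slice line (some 2) none), i)
    else pvALoop rest (i + 1)

def extract_title_and_content (markdown_content : String) : String × String :=
  match PySem.Str.split? markdown_content "\n" with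
  | none => ("", markdown_content)  -- unreachable: separator "\n" is nonempty
  | some lines =>
    match pvALoop lines 0 with
    | none => ("", markdown_content)          -- title stayed ''
    | some (title, content_start) =>
      if title = "" then ("", markdown_content)
      else (title,
        PySem.Str.strip (PySem.Str.join "\n"
          (PySem.List.slice lines (some ((content_start : Int) + 1)) none)))

-- ===== PORT B =====
-- rest.partition('\n') : (part before the first '\n', whether a '\n' was found, part after it)
def pvPartitionNl : List Char → List Char × Bool × List Char
  | [] => ([], false, [])
  | c :: cs =>
    if c = '\n' then ([], true, cs)
    else
      let p := pvPartitionNl cs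
      (c :: p.1, p.2.1, p.2.2)

theorem pvPartitionNl_len : ∀ (s : List Char), (pvPartitionNl s).2.1 = true →
    (pvPartitionNl s).2.2.length < s.length := by
  intro s
  induction s with
  | nil => simp [pvPartitionNl]
  | cons c cs ih =>
    by_cases hc : c = '\n' <;> simp [pvPartitionNl, hc]
    intro h
    exact Nat.le_of_lt (ih h)

-- the 'while True' loop of B, recursing on the part after the first '\n'
def pvBGo (orig : String) (rest : List Char) : String × String :=
  let p := pvPartitionNl rest
  if PySem.Chars.startswith p.1 "# ".toList then
    let title := PySem.Chars.strip (PySem.Chars.slice p.1 (some 2) none)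
    if title = [] then ("", orig)
    else (String.ofList title, String.ofList (PySem.Chars.strip p.2.2))
  else if h : p.2.1 then pvBGo orig p.2.2
  else ("", orig)
termination_by rest.length
decreasing_by exact pvPartitionNl_len rest h

def extract_title_and_content_alt (markdown_content : String) : String × String :=
  pvBGo markdown_content markdown_content.toList

-- ===== PRECONDITION & SPEC =====
def Spec_extract_title_and_content (markdown_content : String) (out : String × String) : Prop := out = extract_title_and_content_alt markdown_content
instance (markdown_content : String) (out : String × String) : Decidable (Spec_extract_title_and_content markdown_content out) := by unfold Spec_extract_title_and_content; infer_instance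

-- ===== CLAIM (what is proved, stated in full; the proofs are below) =====
def Claim_equal_extract_title_and_content : Prop := ∀ (markdown_content : String), Dom_extract_title_and_content markdown_content → Spec_extract_title_and_content markdown_content (extract_title_and_content markdown_content)

-- ===== LEMMAS AND PROOFS =====

-- simple one-pass model of splitting on '\n'
def pvSplitC : List Char → List (List Char)
  | [] => [[]]
  | c :: cs =>
    match pvSplitC cs with
    | [] => [[]]  -- unreachable
    | h :: t => if c = '\n' then [] :: h :: t else (c :: h) :: t

theorem pvSplitC_ne_nil (s : List Char) : pvSplitC s ≠ [] := by
  cases s with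
  | nil => simp [pvSplitC]
  | cons c cs =>
    simp only [pvSplitC]
    cases pvSplitC cs with
    | nil => simp
    | cons h t => split_ifs <;> simp

def pvConsHd (p : List Char) : List (List Char) → List (List Char)
  | [] => [p]
  | h :: t => (p ++ h) :: t

theorem pvGo_eq : ∀ (fuel : Nat) (l cur : List Char) (acc : List (List Char)),
    l.length ≤ fuel →
    PySem.Chars.splitOn.go ['\n'] fuel l cur acc
      = acc.reverse ++ pvConsHd cur.reverse (pvSplitC l) := by
  intro fuel
  induction fuel with
  | zero =>
    intro l cur acc hl
    have : l = [] := by cases l <;> simp_all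
    subst this
    simp [PySem.Chars.splitOn.go, pvSplitC, pvConsHd]
  | succ n ih =>
    intro l cur acc hl
    cases l with
    | nil => simp [PySem.Chars.splitOn.go, pvSplitC, pvConsHd]
    | cons c rest =>
      rw [PySem.Chars.splitOn.go]
      by_cases hc : c = '\n'
      · subst hc
        have hpre : List.isPrefixOf ['\n'] ('\n' :: rest) = true := by simp
        rw [if_pos hpre]
        have := ih rest [] (cur.reverse :: acc) (by simpa using Nat.le_of_succ_le_succ hl)
        simp only [List.length_singleton, List.drop_succ_cons, List.drop_zero]
        have h2 : pvConsHd [] (pvSplitC rest) = pvSplitC rest := by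
          cases h : pvSplitC rest with
          | nil => exact absurd h (pvSplitC_ne_nil rest)
          | cons a b => simp [pvConsHd]
        rw [this, show ([] : List Char).reverse = [] from rfl, h2]
        cases h : pvSplitC rest with
        | nil => exact absurd h (pvSplitC_ne_nil rest)
        | cons a b => simp [pvSplitC, h, pvConsHd]
      · have hpre : List.isPrefixOf ['\n'] (c :: rest) = false := by
          simp only [List.isPrefixOf]
          simp [Ne.symm hc]
        rw [if_neg (by simp [hpre])]
        have := ih rest (c :: cur) acc (by simpa using Nat.le_of_succ_le_succ hl)
        rw [this]
        cases h : pvSplitC rest with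
        | nil => exact absurd h (pvSplitC_ne_nil rest)
        | cons a b => simp [pvSplitC, h, hc, pvConsHd]

theorem pvSplitOn_eq (s : List Char) : PySem.Chars.splitOn s ['\n'] = pvSplitC s := by
  rw [PySem.Chars.splitOn, pvGo_eq (s.length + 1) s [] [] (Nat.le_succ _)]
  cases h : pvSplitC s with
  | nil => exact absurd h (pvSplitC_ne_nil s)
  | cons a b => simp [pvConsHd]

theorem pvJoin_splitC (s : List Char) : PySem.Chars.join ['\n'] (pvSplitC s) = s := by
  induction s with
  | nil => simp [pvSplitC, PySem.Chars.join, List.intercalate]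
  | cons c cs ih =>
    simp only [pvSplitC]
    cases h : pvSplitC cs with
    | nil => exact absurd h (pvSplitC_ne_nil cs)
    | cons a b =>
      rw [h] at ih
      by_cases hc : c = '\n'
      · subst hc
        simp only [if_true]
        rw [PySem.Chars.join_cons_cons]
        simpa using ih
      · simp only [if_neg hc]
        cases b with
        | nil =>
          rw [PySem.Chars.join_singleton] at ih ⊢
          simp [ih]
        | cons b0 bs =>
          rw [PySem.Chars.join_cons_cons] at ih ⊢
          simp [ih]

theorem pvSplitC_partition (s : List Char) :
    pvSplitC s = (pvPartitionNl s).1 ::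
      (if (pvPartitionNl s).2.1 then pvSplitC (pvPartitionNl s).2.2 else []) := by
  induction s with
  | nil => simp [pvSplitC, pvPartitionNl]
  | cons c cs ih =>
    by_cases hc : c = '\n'
    · subst hc
      simp only [pvPartitionNl, if_true, pvSplitC]
      cases h : pvSplitC cs with
      | nil => exact absurd h (pvSplitC_ne_nil cs)
      | cons a b => simp [← h]
    · simp only [pvSplitC]
      cases h : pvSplitC cs with
      | nil => exact absurd h (pvSplitC_ne_nil cs)
      | cons a b =>
        rw [h] at ih
        simp only [if_neg hc, pvPartitionNl]
        injection ih with h1 h2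
        subst h1
        subst h2
        simp

theorem pvPartitionNl_false (s : List Char) (h : (pvPartitionNl s).2.1 = false) :
    (pvPartitionNl s).2.2 = [] := by
  induction s with
  | nil => simp [pvPartitionNl]
  | cons c cs ih =>
    by_cases hc : c = '\n' <;> simp [pvPartitionNl, hc] at h ⊢
    · exact ih h

-- the first '# '-heading of a list of lines together with the lines after it
def pvFirstHeadC : List (List Char) → Option (List Char × List (List Char))
  | [] => none
  | l :: r =>
    if PySem.Chars.startswith l "# ".toList then
      some (PySem.Chars.strip (PySem.Chars.slice l (some 2) none), r)
    else pvFirstHeadC r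

theorem pvALoop_spec : ∀ (ls : List String) (i : Nat) (full : List String),
    full.drop i = ls →
    (match pvALoop ls i with
     | none => none
     | some (t, cs) => some (t, full.drop (cs + 1)))
      = (pvFirstHeadC (ls.map String.toList)).map
          (fun p => (String.ofList p.1, (p.2.map String.ofList))) := by
  intro ls
  induction ls with
  | nil => intro i full h; simp [pvALoop, pvFirstHeadC]
  | cons l r ih =>
    intro i full h
    have hsw : PySem.Str.startswith l "# " = PySem.Chars.startswith l.toList "# ".toList := by
      rw [PySem.Str.startswith_eq]
    by_cases hs : PySem.Chars.startswith l.toList "# ".toList = true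
    · simp only [pvALoop, hsw, hs, if_pos, List.map_cons, pvFirstHeadC, Option.map_some]
      have hdrop : full.drop (i + 1) = r := by
        have h2 := congrArg List.tail h
        rw [List.tail_drop] at h2
        simpa using h2
      rw [hdrop]
      simp only [Option.some.injEq, Prod.mk.injEq]
      refine ⟨?_, ?_⟩
      · apply String.toList_inj.mp
        simp [PySem.Str.toList_strip, PySem.Str.toList_slice, PySem.Chars.slice]
      · simp [List.map_map, Function.comp_def]
    · have hs' : PySem.Str.startswith l "# " ≠ true := by rw [hsw]; exact hs
      simp only [pvALoop, if_neg hs', List.map_cons, pvFirstHeadC,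
        if_neg hs]
      apply ih (i + 1) full
      have h2 := congrArg List.tail h
      rw [List.tail_drop] at h2
      simpa using h2

theorem pvJoin_nil : PySem.Chars.join ['\n'] [] = [] := by
  simp [PySem.Chars.join, List.intercalate]

theorem pvMain : ∀ (n : Nat) (rest : List Char), rest.length ≤ n → ∀ (orig : String),
    (match pvFirstHeadC (pvSplitC rest) with
     | none => ("", orig)
     | some (t, tail) =>
       if t = [] then ("", orig)
       else (String.ofList t, String.ofList (PySem.Chars.strip (PySem.Chars.join ['\n'] tail))))
      = pvBGo orig rest := by
  intro n
  induction n with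
  | zero =>
    intro rest hlen orig
    have hr : rest = [] := by cases rest <;> simp_all
    subst hr
    rw [pvBGo]
    simp [pvPartitionNl, pvSplitC, pvFirstHeadC, PySem.Chars.startswith]
  | succ n ih =>
    intro rest hlen orig
    rw [pvSplitC_partition rest, pvBGo]
    by_cases hs : PySem.Chars.startswith (pvPartitionNl rest).1 "# ".toList = true
    · simp only [pvFirstHeadC, hs, if_true]
      have hjoin : PySem.Chars.join ['\n']
          (if (pvPartitionNl rest).2.1 then pvSplitC (pvPartitionNl rest).2.2 else [])
          = (pvPartitionNl rest).2.2 := by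
        by_cases hf : (pvPartitionNl rest).2.1 = true
        · rw [if_pos hf, pvJoin_splitC]
        · rw [if_neg hf, pvPartitionNl_false rest (by simpa using hf), pvJoin_nil]
      rw [hjoin]
    · have hs' : PySem.Chars.startswith (pvPartitionNl rest).1 "# ".toList = false := by
        simpa using hs
      simp only [pvFirstHeadC, hs', Bool.false_eq_true, if_false]
      by_cases hf : (pvPartitionNl rest).2.1 = true
      · have hlt : (pvPartitionNl rest).2.2.length ≤ n :=
          Nat.lt_succ_iff.mp (Nat.lt_of_lt_of_le (pvPartitionNl_len rest hf) hlen)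
        rw [if_pos hf, dif_pos hf]
        exact ih (pvPartitionNl rest).2.2 hlt orig
      · rw [if_neg hf, dif_neg hf]
        simp [pvFirstHeadC]

-- ===== VERDICT (by name: the statement is the Claim_ definition above) =====
theorem extract_title_and_content_spec : Claim_equal_extract_title_and_content := by
  intro s _
  unfold Spec_extract_title_and_content extract_title_and_content extract_title_and_content_alt
  have hsplit : PySem.Str.split? s "\n" = some (List.map String.ofList (pvSplitC s.toList)) := by
    simp [PySem.Str.split?, PySem.Chars.split?, pvSplitOn_eq]
  rw [hsplit, ← pvMain (s.toList.length) s.toList le_rfl s]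
  have hmaps : (List.map String.ofList (pvSplitC s.toList)).map String.toList
      = pvSplitC s.toList := by
    simp [List.map_map, Function.comp_def]
  have hloop := pvALoop_spec (List.map String.ofList (pvSplitC s.toList)) 0
    (List.map String.ofList (pvSplitC s.toList)) (by simp)
  rw [hmaps] at hloop
  cases hfh : pvFirstHeadC (pvSplitC s.toList) with
  | none =>
    rw [hfh] at hloop
    cases hal : pvALoop (List.map String.ofList (pvSplitC s.toList)) 0 with
    | none => simp [hal]
    | some tc =>
      obtain ⟨t', cs⟩ := tc
      rw [hal] at hloop
      simp at hloop
  | some tp =>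
    obtain ⟨t, tail⟩ := tp
    rw [hfh] at hloop
    cases hal : pvALoop (List.map String.ofList (pvSplitC s.toList)) 0 with
    | none => rw [hal] at hloop; simp at hloop
    | some tc =>
      obtain ⟨t', cs⟩ := tc
      rw [hal] at hloop
      simp only [Option.map_some] at hloop
      have ht' : t' = String.ofList t := by
        have := congrArg (fun o => o.map Prod.fst) hloop
        simpa using this
      have hdrop : (List.map String.ofList (pvSplitC s.toList)).drop (cs + 1)
          = tail.map String.ofList := by
        have := congrArg (fun o => o.map Prod.snd) hloop
        simpa using this
      have hslice : PySem.List.slice (List.map String.ofList (pvSplitC s.toList))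
          (some ((cs : Int) + 1)) none
          = (List.map String.ofList (pvSplitC s.toList)).drop (cs + 1) := by
        rw [PySem.List.slice_from _ (by positivity)]
        norm_num
      have hemp : (t' = "") ↔ (t = []) := by
        subst ht'
        constructor
        · intro h
          have := congrArg String.toList h
          simpa using this
        · intro h; subst h; rfl
      simp only [hal, hslice, hdrop]
      by_cases he : t = []
      · simp [hemp.mpr he, he]
      · rw [if_neg (fun h => he (hemp.mp h)), if_neg he, ht']
        refine Prod.ext rfl ?_
        apply String.toList_inj.mp
        simp [PySem.Str.toList_strip, PySem.Str.toList_join, List.map_map, Function.comp_def]
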